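-- pv_equiv track=rewrite | github.com/samuelit-creator/HRMS | myproject/myapp/views.py | get_quarter_limit
-- ===== SOURCE A (Python) =====
-- LEAVE_POLICY = {
--     "Casual Leave": {
--         (1, 2, 3): 3,
--         (4, 5, 6): 3,
--         (7, 8, 9): 3,
--         (10, 11, 12): 3,
--     },
--     "Sick Leave": {
--         (1, 2, 3): 1,
--         (4, 5, 6): 1,
--         (7, 8, 9): 1,
--         (10, 11, 12): 1,
--     },
--     "Optional Leave": {
--         (4, 5, 6): 1,
--         (10, 11, 12): 1,
--     }
-- }
--
-- def get_quarter_limit(leave_type, month):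
--     rules = LEAVE_POLICY.get(leave_type)
--     if not rules:
--         return None
--
--     for months, limit in rules.items():
--         if month in months:
--             return limit
--     return None
-- ===== SOURCE B (Python) =====
-- QUARTER_LIMITS = {
--     "Casual Leave": [3, 3, 3, 3],
--     "Sick Leave": [1, 1, 1, 1],
--     "Optional Leave": [None, 1, None, 1],
-- }
--
--
-- def get_quarter_limit(leave_type, month):
--     limits = QUARTER_LIMITS.get(leave_type)
--     if limits is None:
--         return None
--     if not 1 <= month <= 12:
--         return None
--     return limits[(month - 1) // 3]
-- ===== Notes on version B (the rewrite author's own statement) =====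
-- stated objective: simpler
-- what changed: Replaces the per-quarter tuple-membership scan with a 4-element quarter-limit table per leave type indexed directly by (month-1)//3 after a 1..12 range guard.
import Mathlib
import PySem

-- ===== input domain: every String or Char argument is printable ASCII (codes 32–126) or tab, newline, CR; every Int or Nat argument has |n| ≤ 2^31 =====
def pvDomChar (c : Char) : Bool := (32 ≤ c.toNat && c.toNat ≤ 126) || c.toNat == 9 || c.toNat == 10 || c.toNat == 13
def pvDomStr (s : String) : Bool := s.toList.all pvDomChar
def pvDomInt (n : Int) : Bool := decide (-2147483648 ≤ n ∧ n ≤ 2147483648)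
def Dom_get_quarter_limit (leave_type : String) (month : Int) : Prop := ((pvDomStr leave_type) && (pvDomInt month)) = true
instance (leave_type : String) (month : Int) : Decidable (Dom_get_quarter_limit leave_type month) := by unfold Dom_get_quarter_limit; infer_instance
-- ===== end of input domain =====

-- B replaces A's tuple-membership scan by a quarter table indexed by (month-1)//3 behind a 1..12 guard (simpler; same value everywhere).

-- ===== PORT A =====
-- LEAVE_POLICY: dict of leave type -> dict of (month,month,month) tuple -> limit
def LEAVE_POLICY : PySem.Dict String (PySem.Dict (Int × Int × Int) Int) :=
  PySem.Dict.mk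
    [ ("Casual Leave", PySem.Dict.mk [((1, 2, 3), 3), ((4, 5, 6), 3), ((7, 8, 9), 3), ((10, 11, 12), 3)])
    , ("Sick Leave", PySem.Dict.mk [((1, 2, 3), 1), ((4, 5, 6), 1), ((7, 8, 9), 1), ((10, 11, 12), 1)])
    , ("Optional Leave", PySem.Dict.mk [((4, 5, 6), 1), ((10, 11, 12), 1)]) ]

-- 'for months, limit in rules.items(): if month in months: return limit' — scan with early return
def pvScanA (month : Int) : List ((Int × Int × Int) × Int) → Option Int
  | [] => none
  | (ms, lim) :: rest =>
      if month = ms.1 ∨ month = ms.2.1 ∨ month = ms.2.2 then some lim else pvScanA month rest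

def get_quarter_limit (leave_type : String) (month : Int) : Option Int :=
  match LEAVE_POLICY.get? leave_type with
  | none => none                                    -- 'if not rules' (rules is None)
  | some rules => if rules.items = [] then none     -- 'if not rules' (rules is an empty dict)
                  else pvScanA month rules.items

-- ===== PORT B =====
def QUARTER_LIMITS : PySem.Dict String (List (Option Int)) :=
  PySem.Dict.mk
    [ ("Casual Leave", [some 3, some 3, some 3, some 3])
    , ("Sick Leave", [some 1, some 1, some 1, some 1])
    , ("Optional Leave", [none, some 1, none, some 1]) ]

def get_quarter_limit_alt (leave_type : String) (month : Int) : Option Int :=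
  match QUARTER_LIMITS.get? leave_type with
  | none => none
  | some limits =>
      if 1 ≤ month ∧ month ≤ 12 then
        PySem.List.pyGetD limits (PySem.Int.floordiv (month - 1) 3) none
      else none

-- ===== PRECONDITION & SPEC =====
def Spec_get_quarter_limit (leave_type : String) (month : Int) (out : Option Int) : Prop := out = get_quarter_limit_alt leave_type month
instance (leave_type : String) (month : Int) (out : Option Int) : Decidable (Spec_get_quarter_limit leave_type month out) := by unfold Spec_get_quarter_limit; infer_instance

-- ===== CLAIM (what is proved, stated in full; the proofs are below) =====
def Claim_equal_get_quarter_limit : Prop := ∀ (leave_type : String) (month : Int), Dom_get_quarter_limit leave_type month → Spec_get_quarter_limit leave_type month (get_quarter_limit leave_type month)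

-- ===== LEMMAS AND PROOFS =====

-- for a known leave type, both sides agree for every month
theorem pv_casual (month : Int) :
    get_quarter_limit "Casual Leave" month = get_quarter_limit_alt "Casual Leave" month := by
  by_cases hm : 1 ≤ month ∧ month ≤ 12
  · obtain ⟨h1, h2⟩ := hm
    interval_cases month <;> decide
  · simp only [get_quarter_limit, get_quarter_limit_alt, LEAVE_POLICY, QUARTER_LIMITS,
      PySem.Dict.get?_mk_cons, pvScanA, String.reduceBEq, Bool.false_eq_true, if_true, if_false,
      List.cons_ne_nil]
    rw [if_neg hm]
    split_ifs <;> first | rfl | (exfalso; omega)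
theorem pv_sick (month : Int) :
    get_quarter_limit "Sick Leave" month = get_quarter_limit_alt "Sick Leave" month := by
  by_cases hm : 1 ≤ month ∧ month ≤ 12
  · obtain ⟨h1, h2⟩ := hm
    interval_cases month <;> decide
  · simp only [get_quarter_limit, get_quarter_limit_alt, LEAVE_POLICY, QUARTER_LIMITS,
      PySem.Dict.get?_mk_cons, pvScanA, String.reduceBEq, Bool.false_eq_true, if_true, if_false,
      List.cons_ne_nil]
    rw [if_neg hm]
    split_ifs <;> first | rfl | (exfalso; omega)
theorem pv_optional (month : Int) :
    get_quarter_limit "Optional Leave" month = get_quarter_limit_alt "Optional Leave" month := by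
  by_cases hm : 1 ≤ month ∧ month ≤ 12
  · obtain ⟨h1, h2⟩ := hm
    interval_cases month <;> decide
  · simp only [get_quarter_limit, get_quarter_limit_alt, LEAVE_POLICY, QUARTER_LIMITS,
      PySem.Dict.get?_mk_cons, pvScanA, String.reduceBEq, Bool.false_eq_true, if_true, if_false,
      List.cons_ne_nil]
    rw [if_neg hm]
    split_ifs <;> first | rfl | (exfalso; omega)

-- ===== VERDICT (by name: the statement is the Claim_ definition above) =====
theorem get_quarter_limit_spec : Claim_equal_get_quarter_limit := by
  intro lt month _
  unfold Spec_get_quarter_limit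
  by_cases h1 : lt = "Casual Leave"
  · subst h1; exact pv_casual month
  by_cases h2 : lt = "Sick Leave"
  · subst h2; exact pv_sick month
  by_cases h3 : lt = "Optional Leave"
  · subst h3; exact pv_optional month
  · simp [get_quarter_limit, get_quarter_limit_alt, LEAVE_POLICY, QUARTER_LIMITS,
      PySem.Dict.get?, Ne.symm h1, Ne.symm h2, Ne.symm h3]
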